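-- pv_equiv track=rewrite | github.com/dictation-toolbox/dtactions | src/dtactions/unimacro/inivars.py | sortHyphenKeys
-- ===== SOURCE A (Python) =====
-- def sortHyphenKeys(keys):
--     """sort keys, first by trailing number (-nnn), second by trunk name (after xx-)
--
--     for use in siteGen, if no hyphens occur in any key, or not of form en-key or key-nnn or en-key-nnn
--     (en = language code, en, fr, ...)
--     (nnn = a numbenaar mijnr)
--     nothing happens
--
-- >>> sortHyphenKeys(['second', 'numbered-2', 'numbered-10'])
-- ['second', 'numbered-2', 'numbered-10']
--
-- >>> sortHyphenKeys(['a', 'bbb-ccc', 'x', 'bbb'])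
-- ['a', 'bbb', 'bbb-ccc', 'x']
--
-- >>> sortHyphenKeys(['second', 'no sort'])
-- ['no sort', 'second']
-- >>> sortHyphenKeys(['single', 's', 'double', 'en-double'])
-- ['s', 'single', 'double', 'en-double']
--
-- >>> sortHyphenKeys(['single', 's', 'double', 'en-double', 'double-2', 'en-double-2', 'double-10', 'en-double-10'])
-- ['s', 'single', 'double', 'en-double', 'double-2', 'en-double-2', 'double-10', 'en-double-10']
--
--
-- >>> sortHyphenKeys(['triple', 'en-triple', 'fr-triple', 'en-triple-3', 'fr-triple-3', 'triple-13', 'fr-triple-13', 'single', 's', 'double', 'en-double', 'double-2', 'en-double-2', 'double-10', 'en-double-10'])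
-- ['s', 'single', 'double', 'en-double', 'triple', 'en-triple', 'fr-triple', 'double-2', 'en-double-2', 'triple-3', 'en-triple-3', 'fr-triple-3', 'double-10', 'en-double-10', 'triple-13', 'fr-triple-13']
--
--
--     """
--
--     D  = {}
--     for k in keys:
--         parts = k.split('-')
--         try:
--             index = int(parts[ - 1])
--         except ValueError:
--             D.setdefault(0, []).append(k)
--         else:
--             D.setdefault(index, []).append(k)
--     mainKeys = list(D.keys())
--     mainKeys.sort()
--     sortedKeys = []
--     for mainKey in mainKeys:
--         sortedKeys.extend(sortLanguageKeys(D[mainKey]))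
--     return sortedKeys
--
-- def sortLanguageKeys(keys):
--     """sort single keys first, then language keys, with neutral on top
--
-- >>> sortLanguageKeys(['triple', 'en-triple', 'fr-triple', 'single', 's', 'double', 'en-double'])
-- ['s', 'single', 'double', 'en-double', 'triple', 'en-triple', 'fr-triple']
--     """
--     _i = 1
--     langKeys = [k for k in keys if len(k) > 2 and k[2] == '-']
--     trunkKeys = {k[3:] for k in langKeys}
--     trunkKeys = list(trunkKeys)
--     nonLangKeys = [k for k in keys if k not in langKeys]
--     singleKeys = [k for k in nonLangKeys if k not in trunkKeys]
--     trunkKeys.sort()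
--     singleKeys.sort()
--     total = singleKeys[:]
--     for trunk in trunkKeys:
--         # get trunk + accompanying language keys:
--         accompany = [k for k in langKeys if k.find(trunk) == 3]
--         accompany.sort()
--         total.append(trunk)
--         for k in accompany:
--             total.append(k)
--             langKeys.remove(k)
--     if langKeys:
--         langKeys.sort()
--         total.extend(langKeys)
--     return total
-- ===== SOURCE B (Python) =====
-- def sortHyphenKeys(keys):
--     """Group keys by trailing number, then language-sort each group with a single
--     key-major grouping pass (no per-trunk rescans, no list.remove)."""
--     groups = {}
--     for k in keys:
--         tail = k.split('-')[-1]
--         try: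
--             n = int(tail)
--         except ValueError:
--             n = 0
--         groups.setdefault(n, []).append(k)
--     out = []
--     for n in sorted(groups):
--         out.extend(_sortLangGroup(groups[n]))
--     return out
--
--
-- def _sortLangGroup(keys):
--     lang = [k for k in keys if len(k) > 2 and k[2] == '-']
--     lang_set = set(lang)
--     trunks = sorted({k[3:] for k in lang})
--     trunk_set = set(trunks)
--     out = sorted(k for k in keys if k not in lang_set and k not in trunk_set)
--     byTrunk = {t: [] for t in trunks}
--     rest = []
--     for k in lang:
--         t = _firstTrunk(k, trunks)
--         if t is None:
--             rest.append(k)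
--         else:
--             byTrunk[t].append(k)
--     for t in trunks:
--         out.append(t)
--         out.extend(sorted(byTrunk[t]))
--     out.extend(sorted(rest))
--     return out
--
--
-- def _firstTrunk(k, trunks):
--     for t in trunks:
--         if k.find(t) == 3:
--             return t
--     return None
-- ===== Notes on version B (the rewrite author's own statement) =====
-- stated objective: alternative
-- what changed: A repeatedly rescans and list.remove()s the language-key list once per trunk and tests membership against lists; B makes one key-major pass assigning each language key to its first matching trunk in a dict of groups, uses sets for the membership tests, and then emits the groups in trunk order.
import Mathlib
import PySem

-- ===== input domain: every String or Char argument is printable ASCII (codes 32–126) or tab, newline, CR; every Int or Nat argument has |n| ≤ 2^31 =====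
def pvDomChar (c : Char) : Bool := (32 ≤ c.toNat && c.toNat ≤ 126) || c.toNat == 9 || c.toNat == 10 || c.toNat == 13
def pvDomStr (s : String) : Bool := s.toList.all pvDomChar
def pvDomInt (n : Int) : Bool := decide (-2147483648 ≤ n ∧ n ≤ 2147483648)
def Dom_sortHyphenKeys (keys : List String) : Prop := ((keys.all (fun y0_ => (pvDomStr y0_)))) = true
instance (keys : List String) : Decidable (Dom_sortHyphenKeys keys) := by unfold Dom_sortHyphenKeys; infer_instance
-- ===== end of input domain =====

-- B replaces A's per-trunk rescans of langKeys with list.remove by one key-major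
-- grouping pass (first matching trunk per key, dict of groups); same return value,
-- same cost class (objective: alternative structure, not speed).

-- ===== PORT A =====
-- helper sortLanguageKeys of A, transliterated
def sortLanguageKeysA (keys : List String) : List String :=
  let langKeys := keys.filter (fun k => decide (2 < PySem.Str.len k) && (PySem.Str.pyGet? k 2 == some '-'))
  let trunkKeys : PySem.Set String := PySem.Set.ofList (langKeys.map (fun k => PySem.Str.slice k (some 3) none))
  let nonLangKeys := keys.filter (fun k => !(langKeys.contains k))
  let singleKeys := nonLangKeys.filter (fun k => !(trunkKeys.contains k))
  let trunkSorted := PySem.List.sorted trunkKeys (fun x => x) false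
  let singleSorted := PySem.List.sorted singleKeys (fun x => x) false
  -- for trunk in trunkKeys: accompany = [k for k in langKeys if k.find(trunk) == 3]; …
  let st := trunkSorted.foldl (fun (st : List String × List String) trunk =>
      let accompany := st.2.filter (fun k => PySem.Str.find k trunk == 3)
      let accompany := PySem.List.sorted accompany (fun x => x) false
      (st.1 ++ [trunk] ++ accompany,
       accompany.foldl (fun l k => (PySem.List.remove? l k).getD l) st.2))
    (singleSorted, langKeys)
  if st.2 = [] then st.1 else st.1 ++ PySem.List.sorted st.2 (fun x => x) false

def sortHyphenKeys (keys : List String) : List String :=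
  let D : PySem.Dict Int (List String) := keys.foldl (fun D k =>
      let parts := (PySem.Str.split? k "-").getD []
      match PySem.Int.ofStr? (PySem.List.pyGetD parts (-1) "") with
      | none => D.modify 0 [] (· ++ [k])          -- D.setdefault(0, []).append(k)
      | some index => D.modify index [] (· ++ [k])) PySem.Dict.empty
  let mainKeys := PySem.List.sorted D.keys (fun x => x) false
  mainKeys.foldl (fun sortedKeys mainKey => sortedKeys ++ sortLanguageKeysA (D.getD mainKey [])) []

-- ===== PORT B =====
-- _firstTrunk of Source B: first trunk t (in sorted order) with k.find(t) == 3
def pvFirstTrunk (k : String) : List String → Option String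
  | [] => none
  | t :: ts => if PySem.Str.find k t == 3 then some t else pvFirstTrunk k ts

-- _sortLangGroup of Source B
def pvSortLangGroup (keys : List String) : List String :=
  let lang := keys.filter (fun k => decide (2 < PySem.Str.len k) && (PySem.Str.pyGet? k 2 == some '-'))
  let langSet : PySem.Set String := PySem.Set.ofList lang
  let trunks := PySem.List.sorted (PySem.Set.ofList (lang.map (fun k => PySem.Str.slice k (some 3) none))) (fun x => x) false
  let trunkSet : PySem.Set String := PySem.Set.ofList trunks
  let out := PySem.List.sorted (keys.filter (fun k => !(PySem.Set.contains langSet k) && !(PySem.Set.contains trunkSet k))) (fun x => x) false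
  let byTrunk : PySem.Dict String (List String) := trunks.foldl (fun d t => d.insert t []) PySem.Dict.empty
  let st := lang.foldl (fun (st : PySem.Dict String (List String) × List String) k =>
      match pvFirstTrunk k trunks with
      | none => (st.1, st.2 ++ [k])
      | some t => (st.1.modify t [] (· ++ [k]), st.2)) (byTrunk, [])
  let out := trunks.foldl (fun out t => out ++ [t] ++ PySem.List.sorted (st.1.getD t []) (fun x => x) false) out
  out ++ PySem.List.sorted st.2 (fun x => x) false

def sortHyphenKeys_alt (keys : List String) : List String :=
  let groups : PySem.Dict Int (List String) := keys.foldl (fun g k =>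
      let tail := PySem.List.pyGetD ((PySem.Str.split? k "-").getD []) (-1) ""
      let n := (PySem.Int.ofStr? tail).getD 0
      g.modify n [] (· ++ [k])) PySem.Dict.empty
  (PySem.List.sorted groups.keys (fun x => x) false).foldl
    (fun out n => out ++ pvSortLangGroup (groups.getD n [])) []

-- ===== PRECONDITION & SPEC =====
def Spec_sortHyphenKeys (keys : List String) (out : List String) : Prop := out = sortHyphenKeys_alt keys
instance (keys : List String) (out : List String) : Decidable (Spec_sortHyphenKeys keys out) := by unfold Spec_sortHyphenKeys; infer_instance

-- ===== CLAIM (what is proved, stated in full; the proofs are below) =====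
def Claim_equal_sortHyphenKeys : Prop := ∀ (keys : List String), Dom_sortHyphenKeys keys → Spec_sortHyphenKeys keys (sortHyphenKeys keys)

-- ===== LEMMAS AND PROOFS =====

theorem pv_remove_getD (l : List String) (k : String) :
    (PySem.List.remove? l k).getD l = l.erase k := by
  by_cases h : k ∈ l
  · rw [PySem.List.remove?_eq_some_erase _ _ h]; rfl
  · rw [(PySem.List.remove?_eq_none_iff _ _).2 h, List.erase_of_not_mem h]; rfl

theorem pv_diff_filter (l : List String) (p : String → Bool) :
    l.diff (l.filter p) = l.filter (fun x => !p x) := by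
  induction l with
  | nil => simp
  | cons x l ih =>
    by_cases h : p x
    · simpa [h, List.cons_diff] using ih
    · rw [List.filter_cons_of_neg (by simp [h]), List.cons_diff]
      have hx : x ∉ l.filter p := fun hm => h (List.of_mem_filter hm)
      simp [hx, ih, h]

-- the removal loop of A: erasing all p-elements (in any order) is a filter
theorem pv_erase_fold (L ys : List String) (p : String → Bool)
    (hperm : ys.Perm (L.filter p)) :
    ys.foldl (fun l k => (PySem.List.remove? l k).getD l) L = L.filter (fun k => !p k) := by
  have h1 : ys.foldl (fun l k => (PySem.List.remove? l k).getD l) L = ys.foldl List.erase L := by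
    apply PySem.List.foldl_congr_mem
    intro acc x _; exact pv_remove_getD acc x
  rw [h1, ← List.diff_eq_foldl, List.Perm.diff_left L hperm, pv_diff_filter]

theorem pvFirstTrunk_mem {k t : String} : ∀ {ts : List String},
    pvFirstTrunk k ts = some t → t ∈ ts := by
  intro ts
  induction ts with
  | nil => intro h; simp [pvFirstTrunk] at h
  | cons u ts ih =>
    intro h
    unfold pvFirstTrunk at h
    split at h
    · injection h with h; subst h; exact List.mem_cons_self ..
    · exact List.mem_cons_of_mem _ (ih h)

theorem pvFirstTrunk_cons (k t : String) (ts : List String) :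
    pvFirstTrunk k (t :: ts) = if PySem.Str.find k t == 3 then some t else pvFirstTrunk k ts := rfl

theorem pv_loopA (ts : List String) : ∀ (L tot : List String), ts.Nodup →
    (ts.foldl (fun (st : List String × List String) t =>
        (st.1 ++ [t] ++ PySem.List.sorted (st.2.filter (fun k => PySem.Str.find k t == 3)) (fun x => x) false,
         st.2.filter (fun k => !(PySem.Str.find k t == 3)))) (tot, L))
    = (tot ++ ts.flatMap (fun t => t :: PySem.List.sorted (L.filter (fun k => pvFirstTrunk k ts == some t)) (fun x => x) false),
       L.filter (fun k => pvFirstTrunk k ts == none)) := by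
  induction ts with
  | nil => intro L tot _; simp [pvFirstTrunk]
  | cons t ts ih =>
    intro L tot hnd
    have htn : t ∉ ts := (List.nodup_cons.1 hnd).1
    have hnd' : ts.Nodup := (List.nodup_cons.1 hnd).2
    rw [List.foldl_cons, ih _ _ hnd']
    dsimp only
    simp only [Prod.mk.injEq]
    constructor
    · -- output component
      rw [List.flatMap_cons]
      have hhead : L.filter (fun k => pvFirstTrunk k (t :: ts) == some t)
          = L.filter (fun k => PySem.Str.find k t == 3) := by
        apply List.filter_congr
        intro k _
        rw [pvFirstTrunk_cons]
        by_cases hp : PySem.Chars.find k.toList t.toList = 3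
        · rw [if_pos (by simp [hp])]; simp [hp]
        · rw [if_neg (by simp [hp])]
          have hne : pvFirstTrunk k ts ≠ some t := fun h => htn (pvFirstTrunk_mem h)
          simp [hne, hp]
      have htail : ∀ u ∈ ts,
          (L.filter (fun k => !(PySem.Str.find k t == 3))).filter (fun k => pvFirstTrunk k ts == some u)
          = L.filter (fun k => pvFirstTrunk k (t :: ts) == some u) := by
        intro u hu
        rw [List.filter_filter]
        apply List.filter_congr
        intro k _
        rw [pvFirstTrunk_cons]
        by_cases hp : PySem.Chars.find k.toList t.toList = 3
        · rw [if_pos (by simp [hp])]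
          have htu : t ≠ u := fun h => htn (h ▸ hu)
          simp [hp, htu]
        · rw [if_neg (by simp [hp])]
          simp [hp]
      have hfm : ts.flatMap (fun u => u :: PySem.List.sorted ((L.filter (fun k => !(PySem.Str.find k t == 3))).filter (fun k => pvFirstTrunk k ts == some u)) (fun x => x) false)
          = ts.flatMap (fun u => u :: PySem.List.sorted (L.filter (fun k => pvFirstTrunk k (t :: ts) == some u)) (fun x => x) false) := by
        rw [List.flatMap, List.flatMap]
        congr 1
        apply List.map_congr_left
        intro u hu; rw [htail u hu]
      rw [hfm, hhead]
      simp [List.append_assoc]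
    · -- remaining langKeys component
      rw [List.filter_filter]
      apply List.filter_congr
      intro k _
      rw [pvFirstTrunk_cons]
      by_cases hp : PySem.Chars.find k.toList t.toList = 3
      · rw [if_pos (by simp [hp])]; simp [hp]
      · rw [if_neg (by simp [hp])]
        simp [hp]

-- all trunks start with [] in byTrunk
theorem pv_byTrunk0 (ts : List String) : ∀ (d : PySem.Dict String (List String)),
    (∀ t, d.getD t [] = []) → ∀ t, (ts.foldl (fun d t => d.insert t []) d).getD t [] = [] := by
  induction ts with
  | nil => intro d hd t; exact hd t
  | cons u ts ih =>
    intro d hd t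
    apply ih
    intro t'
    rw [PySem.Dict.getD_insert]
    split <;> simp [hd]

-- the grouping pass of B builds, per trunk, the filter of lang by first-trunk
theorem pv_groupFold (ts : List String) (lang : List String) :
    ∀ (d : PySem.Dict String (List String)) (t : String),
    (lang.foldl (fun d k => match pvFirstTrunk k ts with
        | none => d
        | some u => d.modify u [] (· ++ [k])) d).getD t []
    = d.getD t [] ++ lang.filter (fun k => pvFirstTrunk k ts == some t) := by
  induction lang with
  | nil => intro d t; simp
  | cons k lang ih =>
    intro d t
    rw [List.foldl_cons]
    cases hft : pvFirstTrunk k ts with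
    | none => rw [List.filter_cons_of_neg (by simp [hft])]; exact ih d t
    | some u =>
      by_cases htu : t = u
      · subst htu
        rw [ih, List.filter_cons_of_pos (by simp [hft])]
        rw [PySem.Dict.getD_modify]
        simp [List.append_assoc]
      · rw [ih, List.filter_cons_of_neg (by simp [hft]; exact fun h => htu h.symm),
          PySem.Dict.getD_modify]
        simp [htu]

-- B's paired fold is its two component folds
theorem pv_split_pair (ts : List String) : ∀ (lang : List String)
    (d0 : PySem.Dict String (List String)) (r0 : List String),
    lang.foldl (fun (st : PySem.Dict String (List String) × List String) k =>
        match pvFirstTrunk k ts with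
        | none => (st.1, st.2 ++ [k])
        | some t => (st.1.modify t [] (· ++ [k]), st.2)) (d0, r0)
    = (lang.foldl (fun d k => match pvFirstTrunk k ts with
        | none => d
        | some u => d.modify u [] (· ++ [k])) d0,
       r0 ++ lang.filter (fun k => pvFirstTrunk k ts == none)) := by
  intro lang
  induction lang with
  | nil => intro d0 r0; simp
  | cons k lang ih =>
    intro d0 r0
    rw [List.foldl_cons, List.foldl_cons]
    cases hft : pvFirstTrunk k ts with
    | none =>
      rw [List.filter_cons_of_pos (by simp [hft])]
      simp only [ih]
      simp [List.append_assoc]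
    | some u =>
      rw [List.filter_cons_of_neg (by simp [hft])]
      simp only [ih]

-- B's emission loop is a flatMap
theorem pv_emitB (ts : List String) (out0 : List String) (f : String → List String) :
    ts.foldl (fun out t => out ++ [t] ++ f t) out0 = out0 ++ ts.flatMap (fun t => t :: f t) := by
  have h : ts.foldl (fun out t => out ++ [t] ++ f t) out0
      = ts.foldl (fun out t => out ++ (t :: f t)) out0 := by
    apply PySem.List.foldl_congr_mem
    intro acc t _; simp
  rw [h, PySem.List.foldl_append_eq_flatMap]

theorem pv_contains_ofList (l : List String) (k : String) :
    List.contains (PySem.Set.ofList l) k = l.contains k := by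
  by_cases h : k ∈ l
  · have h1 : k ∈ PySem.Set.ofList l := (PySem.Set.mem_ofList l k).2 h
    simp [h, h1]
  · have h1 : k ∉ PySem.Set.ofList l := fun hm => h ((PySem.Set.mem_ofList l k).1 hm)
    simp [h, h1]

theorem pv_contains_sorted (l : List String) (k : String) :
    List.contains (PySem.List.sorted l (fun x => x) false) k = l.contains k := by
  by_cases h : k ∈ l
  · have h1 : k ∈ PySem.List.sorted l (fun x => x) false := (PySem.List.mem_sorted l _ _ k).2 h
    simp [h, h1]
  · have h1 : k ∉ PySem.List.sorted l (fun x => x) false :=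
      fun hm => h ((PySem.List.mem_sorted l _ _ k).1 hm)
    simp [h, h1]

-- the language-group helpers agree
theorem pv_lang_eq (keys : List String) : sortLanguageKeysA keys = pvSortLangGroup keys := by
  simp only [sortLanguageKeysA, pvSortLangGroup]
  set lang := List.filter (fun k => decide (2 < PySem.Str.len k) && PySem.Str.pyGet? k 2 == some '-') keys with hlang
  set ts := PySem.List.sorted (PySem.Set.ofList (List.map (fun k => PySem.Str.slice k (some 3) none) lang)) (fun x => x) false with hts
  have hndts : ts.Nodup := (PySem.List.sorted_perm _ _ _).symm.nodup (PySem.Set.nodup_ofList _)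
  -- the single keys agree
  have hsingle : (List.filter (fun k => !(PySem.Set.ofList (List.map (fun k => PySem.Str.slice k (some 3) none) lang)).contains k) (List.filter (fun k => !lang.contains k) keys))
      = List.filter (fun k => !(PySem.Set.contains (PySem.Set.ofList lang) k) && !(PySem.Set.contains (PySem.Set.ofList ts) k)) keys := by
    rw [List.filter_filter]
    apply List.filter_congr
    intro k _
    simp only [PySem.Set.contains_eq_listContains]
    rw [Bool.and_comm, hts]
    simp only [pv_contains_sorted, pv_contains_ofList]
  rw [hsingle]
  -- A's removal loop is a filter
  rw [show (fun (st : List String × List String) trunk =>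
      (st.1 ++ [trunk] ++ PySem.List.sorted (st.2.filter (fun k => PySem.Str.find k trunk == 3)) (fun x => x) false,
       (PySem.List.sorted (st.2.filter (fun k => PySem.Str.find k trunk == 3)) (fun x => x) false).foldl
         (fun l k => (PySem.List.remove? l k).getD l) st.2))
    = (fun (st : List String × List String) t =>
      (st.1 ++ [t] ++ PySem.List.sorted (st.2.filter (fun k => PySem.Str.find k t == 3)) (fun x => x) false,
       st.2.filter (fun k => !(PySem.Str.find k t == 3)))) from by
    funext st t
    rw [pv_erase_fold st.2 _ _ (PySem.List.sorted_perm _ _ _)]]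
  rw [pv_loopA ts lang _ hndts]
  -- B: split the paired fold, read off the groups, flatten the emission loop
  rw [pv_split_pair ts lang _ []]
  dsimp only
  rw [List.nil_append, pv_emitB]
  have hflat : ts.flatMap (fun t => t :: PySem.List.sorted ((lang.foldl (fun d k => match pvFirstTrunk k ts with
      | none => d
      | some u => d.modify u [] (· ++ [k])) (ts.foldl (fun d t => d.insert t []) PySem.Dict.empty)).getD t []) (fun x => x) false)
      = ts.flatMap (fun t => t :: PySem.List.sorted (lang.filter (fun k => pvFirstTrunk k ts == some t)) (fun x => x) false) := by
    rw [List.flatMap, List.flatMap]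
    congr 1
    apply List.map_congr_left
    intro t ht
    rw [pv_groupFold, pv_byTrunk0 ts PySem.Dict.empty (fun _ => rfl) t, List.nil_append]
  rw [hflat]
  by_cases hrest : lang.filter (fun k => pvFirstTrunk k ts == none) = []
  · rw [if_pos hrest, hrest]
    simp [PySem.List.sorted_eq_nil_iff]
  · rw [if_neg hrest]

theorem pv_top_eq (keys : List String) : sortHyphenKeys keys = sortHyphenKeys_alt keys := by
  simp only [sortHyphenKeys, sortHyphenKeys_alt]
  have hD : keys.foldl (fun (D : PySem.Dict Int (List String)) k =>
        match PySem.Int.ofStr? (PySem.List.pyGetD ((PySem.Str.split? k "-").getD []) (-1) "") with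
        | none => D.modify 0 [] (· ++ [k])
        | some index => D.modify index [] (· ++ [k])) PySem.Dict.empty
      = keys.foldl (fun (g : PySem.Dict Int (List String)) k =>
        g.modify ((PySem.Int.ofStr? (PySem.List.pyGetD ((PySem.Str.split? k "-").getD []) (-1) "")).getD 0) [] (· ++ [k])) PySem.Dict.empty := by
    apply PySem.List.foldl_congr_mem
    intro acc k _
    cases h : PySem.Int.ofStr? (PySem.List.pyGetD ((PySem.Str.split? k "-").getD []) (-1) "") with
    | none => simp only [Option.getD_none]
    | some i => simp only [Option.getD_some]
  rw [hD]
  apply PySem.List.foldl_congr_mem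
  intro acc mk _
  rw [pv_lang_eq]
-- ===== VERDICT (by name: the statement is the Claim_ definition above) =====
theorem sortHyphenKeys_spec : Claim_equal_sortHyphenKeys := by
  intro keys _
  exact pv_top_eq keys
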